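-- pv_equiv track=rewrite | github.com/qlalfdmlghk1/Algorism_Python | programers/풀이성공/공원.py | solution
-- ===== SOURCE A (Python) =====
-- def solution(mats, park):
--     n,m = len(park),len(park[0])
--     dp_park = [[] for _ in range(n)]
--     for i in range(n) :
--         for j in range(m) :
--             if park[i][j] == "-1" :
--                 dp_park[i].append(1)
--             else :
--                 dp_park[i].append(0)
--
--     max_length = 0
--
--     for i in range(n) :
--         for j in range(m) :
--             if dp_park[i][j] == 1 :
--                 if i == 0 or j == 0 :
--                     continue
--                 else :
--                     if dp_park[i-1][j-1] != 0 and dp_park[i][j-1] != 0 and dp_park[i-1][j] != 0 :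
--                         dp_park[i][j] = min(dp_park[i-1][j-1], dp_park[i][j-1], dp_park[i-1][j]) + 1
--
--             max_length = max(max_length,dp_park[i][j])
--
--     mats.sort(reverse=True)
--     for mat in mats :
--         if mat <= max_length :
--             return mat
--     return -1
-- ===== SOURCE B (Python) =====
-- def solution(mats, park):
--     # Prefix-sum algorithm: build a 2D prefix-sum table over the binary grid
--     # (1 where the cell is "-1"), then for each side s check in O(1) per window
--     # whether some s x s window sums to s*s (i.e. is all free); keep the largest
--     # such s.  No maximal-square DP recurrence at all.  Like A, sorts mats in
--     # place and returns the largest mat that fits, else -1.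
--     n, m = len(park), len(park[0])
--     S = [[0] * (m + 1) for _ in range(n + 1)]
--     for i in range(n):
--         for j in range(m):
--             S[i + 1][j + 1] = (S[i][j + 1] + S[i + 1][j] - S[i][j]
--                                + (1 if park[i][j] == "-1" else 0))
--     best = 0
--     for s in range(1, min(n, m) + 1):
--         if any(S[i + s][j + s] - S[i][j + s] - S[i + s][j] + S[i][j] == s * s
--                for i in range(n - s + 1) for j in range(m - s + 1)):
--             best = s
--     mats.sort(reverse=True)
--     for mat in mats:
--         if mat <= best:
--             return mat
--     return -1
-- ===== Notes on version B (the rewrite author's own statement) =====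
-- stated objective: alternative
-- what changed: B abandons A's in-place maximal-square min-of-three DP table entirely: it builds a 2D prefix-sum table over the binary grid and finds the largest side s for which some s-by-s window's O(1) prefix-sum equals s*s; like A it then sorts mats descending in place and returns the first mat that fits.
-- intended difference: On parks whose "-1" cells all lie in the first row or first column (and 1 in mats), A's `continue` skips the max_length update so A returns the largest mat <= 0 (or -1), while B returns 1 -- the intended answer, since a 1x1 mat fits on any single free cell. — e.g. on solution([1], [["-1"]]): A returns -1, B returns 1
import Mathlib
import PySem

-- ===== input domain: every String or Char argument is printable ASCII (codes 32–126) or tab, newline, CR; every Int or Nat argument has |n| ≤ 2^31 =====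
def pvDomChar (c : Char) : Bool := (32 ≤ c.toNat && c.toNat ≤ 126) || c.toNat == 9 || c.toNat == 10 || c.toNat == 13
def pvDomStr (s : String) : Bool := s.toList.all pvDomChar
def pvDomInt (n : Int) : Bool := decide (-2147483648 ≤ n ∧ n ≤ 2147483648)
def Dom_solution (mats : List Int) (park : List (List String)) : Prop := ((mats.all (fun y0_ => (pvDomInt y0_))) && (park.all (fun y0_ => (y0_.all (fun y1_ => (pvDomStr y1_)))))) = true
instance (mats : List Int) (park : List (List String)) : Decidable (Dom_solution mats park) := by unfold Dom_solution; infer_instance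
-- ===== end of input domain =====

-- B replaces A's in-place maximal-square DP table by a different algorithm: a 2D
-- prefix-sum table over the binary grid plus a scan for the largest side s whose
-- s×s window sum equals s*s; both sort `mats` in place and pick the first fit.

-- ===== PORT A =====
def solution (mats : List Int) (park : List (List String)) : Int :=
  let n := park.length
  let m := (park.headD []).length
  let dp0 : List (List Int) := (List.range n).map (fun _ => ([] : List Int))
  let dp1 := (List.range n).foldl (fun dp i =>
      (List.range m).foldl (fun dp j =>
        dp.set i ((dp.getD i []) ++ [if (park.getD i []).getD j "" == "-1" then (1:Int) else 0])) dp) dp0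
  let st := (List.range n).foldl (fun (st : List (List Int) × Int) i =>
      (List.range m).foldl (fun (st : List (List Int) × Int) j =>
        let dp := st.1
        if (dp.getD i []).getD j 0 == 1 then
          if i == 0 || j == 0 then st
          else
            let a := (dp.getD (i-1) []).getD (j-1) 0
            let b := (dp.getD i []).getD (j-1) 0
            let c := (dp.getD (i-1) []).getD j 0
            let dp' := if a != 0 && b != 0 && c != 0 then
                dp.set i ((dp.getD i []).set j (min (min a b) c + 1))
              else dp
            (dp', max st.2 ((dp'.getD i []).getD j 0))
        else (dp, max st.2 ((dp.getD i []).getD j 0))) st) (dp1, 0)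
  match (PySem.List.sorted mats (fun x => x) true).find? (fun mat => decide (mat ≤ st.2)) with
  | some mat => mat
  | none => -1

-- ===== PORT B =====
def solution_alt (mats : List Int) (park : List (List String)) : Int :=
  let n := park.length
  let m := (park.headD []).length
  let S0 : List (List Int) := List.replicate (n+1) (List.replicate (m+1) (0:Int))
  let S := (List.range n).foldl (fun S i =>
      (List.range m).foldl (fun S j =>
        S.set (i+1) ((S.getD (i+1) []).set (j+1)
          ((S.getD i []).getD (j+1) 0 + (S.getD (i+1) []).getD j 0 - (S.getD i []).getD j 0
            + (if (park.getD i []).getD j "" == "-1" then (1:Int) else 0)))) S) S0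
  let best := (List.range (min n m)).foldl (fun (best : Int) k =>
      let s := k + 1
      if (List.range (n - s + 1)).any (fun i => (List.range (m - s + 1)).any (fun j =>
          (S.getD (i+s) []).getD (j+s) 0 - (S.getD i []).getD (j+s) 0
            - (S.getD (i+s) []).getD j 0 + (S.getD i []).getD j 0 == (s:Int) * (s:Int)))
      then ((s : Nat) : Int) else best) 0
  match (PySem.List.sorted mats (fun x => x) true).find? (fun mat => decide (mat ≤ best)) with
  | some mat => mat
  | none => -1

-- ===== PRECONDITION & SPEC =====
-- Pre_ excludes exactly the inputs where the Python raises IndexError (both A and B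
-- do): an empty park, or a row shorter than the first row.
def Pre_solution (mats : List Int) (park : List (List String)) : Prop :=
  park ≠ [] ∧ ∀ row ∈ park, (park.headD []).length ≤ row.length
instance (mats : List Int) (park : List (List String)) : Decidable (Pre_solution mats park) := by unfold Pre_solution; infer_instance
def pvWitness_solution : List Int × List (List String) := ([3, 1], [["-1", "-1"], ["-1", "-1"]])

-- A's `continue` for cells in row 0 / column 0 also skips the max_length update, so a
-- park whose "-1" cells all lie in the first row or first column yields max_length 0
-- instead of 1; when 1 ∈ mats A then returns the largest mat ≤ 0 (or -1) while B
-- returns the intended 1 (a 1×1 mat fits on any single free cell).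
def D_solution (mats : List Int) (park : List (List String)) : Prop :=
  (∃ i < park.length, ∃ j < (park.headD []).length, (park.getD i []).getD j "" = "-1") ∧
  (∀ i < park.length, ∀ j < (park.headD []).length, (park.getD i []).getD j "" = "-1" → i = 0 ∨ j = 0) ∧
  (1 : Int) ∈ mats
instance (mats : List Int) (park : List (List String)) : Decidable (D_solution mats park) := by unfold D_solution; infer_instance
def Spec_solution (mats : List Int) (park : List (List String)) (out : Int) : Prop := ¬ D_solution mats park → out = solution_alt mats park
instance (mats : List Int) (park : List (List String)) (out : Int) : Decidable (Spec_solution mats park out) := by unfold Spec_solution; infer_instance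
def pvDiffWitness_solution : List Int × List (List String) := ([1], [["-1"]])
def pvDiffWitnessOut_solution : Int × Int := (-1, 1)

-- ===== CLAIM =====
def Claim_unchanged_solution : Prop := ∀ (mats : List Int) (park : List (List String)), Dom_solution mats park → Pre_solution mats park → Spec_solution mats park (solution mats park)
def Claim_changed_solution : Prop := Dom_solution (pvDiffWitness_solution.1) (pvDiffWitness_solution.2) ∧ Pre_solution (pvDiffWitness_solution.1) (pvDiffWitness_solution.2) ∧ D_solution (pvDiffWitness_solution.1) (pvDiffWitness_solution.2) ∧ solution (pvDiffWitness_solution.1) (pvDiffWitness_solution.2) = pvDiffWitnessOut_solution.1 ∧ solution_alt (pvDiffWitness_solution.1) (pvDiffWitness_solution.2) = pvDiffWitnessOut_solution.2 ∧ pvDiffWitnessOut_solution.1 ≠ pvDiffWitnessOut_solution.2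
def Claim_exact_solution : Prop := ∀ (mats : List Int) (park : List (List String)), Dom_solution mats park → Pre_solution mats park → D_solution mats park → solution mats park ≠ solution_alt mats park

-- ===== LEMMAS AND PROOFS =====

-- ---- A-side characterisation: the DP value of each cell ----

def pvFinVal (prev : List Int) (row : List String) : Nat → Int
  | 0 => if row.getD 0 "" == "-1" then min (min 0 (prev.getD 0 0)) 0 + 1 else 0
  | j+1 => if row.getD (j+1) "" == "-1" then
      min (min (pvFinVal prev row j) (prev.getD (j+1) 0)) (prev.getD j 0) + 1 else 0

def pvFinRow (m : Nat) (prev : List Int) (row : List String) : List Int :=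
  (List.range m).map (pvFinVal prev row)

def pvFinRows (m : Nat) (prev : List Int) : List (List String) → List (List Int)
  | [] => []
  | r :: rs => pvFinRow m prev r :: pvFinRows m (pvFinRow m prev r) rs

def pvBinRow (m : Nat) (row : List String) : List Int :=
  (List.range m).map (fun j => if row.getD j "" == "-1" then (1:Int) else 0)

lemma pv_set_map_range {α : Type} (n : Nat) (F : Nat → α) (i : Nat) (R : α) (h : i < n) :
    ((List.range n).map F).set i R = (List.range n).map (fun k => if k = i then R else F k) := by
  apply List.ext_getElem
  · simp
  · intro k h1 h2
    simp only [List.length_set, List.length_map, List.length_range] at h1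
    rw [List.getElem_set]
    simp only [List.getElem_map, List.getElem_range]
    by_cases hk : k = i
    · simp [hk]
    · simp [hk, show ¬ i = k from fun h' => hk h'.symm]

lemma pvA_phase1_inner (m : Nat) (cell : Nat → String) (dp : List (List Int)) (i : Nat)
    (h : i < dp.length) (k : Nat) :
    (List.range k).foldl (fun dp j =>
        dp.set i ((dp.getD i []) ++ [if cell j == "-1" then (1:Int) else 0])) dp
    = dp.set i (dp.getD i [] ++ (List.range k).map (fun j => if cell j == "-1" then (1:Int) else 0)) := by
  induction k with
  | zero =>
    simp only [List.range_zero, List.foldl_nil, List.map_nil, List.append_nil]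
    have := List.getD_eq_getElem dp [] h
    rw [this, List.set_getElem_self]
  | succ k ih =>
    rw [List.range_succ, List.foldl_append, ih]
    simp only [List.foldl_cons, List.foldl_nil, List.map_append, List.map_cons, List.map_nil]
    rw [List.set_set]
    congr 1
    have hlen : i < (dp.set i (dp.getD i [] ++ (List.range k).map (fun j => if cell j == "-1" then (1:Int) else 0))).length := by simpa
    rw [List.getD_eq_getElem _ [] hlen, List.getElem_set_self]
    simp

lemma pvA_phase1 (m n : Nat) (park : List (List String)) (t : Nat) (ht : t ≤ n) :
    (List.range t).foldl (fun dp i =>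
      (List.range m).foldl (fun dp j =>
        dp.set i ((dp.getD i []) ++ [if (park.getD i []).getD j "" == "-1" then (1:Int) else 0])) dp)
      ((List.range n).map (fun _ => ([] : List Int)))
    = (List.range n).map (fun i => if i < t then pvBinRow m (park.getD i []) else []) := by
  induction t with
  | zero => simp
  | succ t ih =>
    rw [List.range_succ, List.foldl_append, ih (Nat.le_of_succ_le ht)]
    simp only [List.foldl_cons, List.foldl_nil]
    have hlen : t < ((List.range n).map (fun i => if i < t then pvBinRow m (park.getD i []) else [])).length := by
      simp; omega
    rw [pvA_phase1_inner m (fun j => (park.getD t []).getD j "") _ t hlen m]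
    have hget : ((List.range n).map (fun i => if i < t then pvBinRow m (park.getD i []) else [])).getD t [] = [] := by
      rw [PySem.List.getD_map_range _ _ _ _ (by omega : t < n)]
      simp
    rw [hget, pv_set_map_range _ _ _ _ (by omega : t < n)]
    apply List.map_congr_left
    intro k hk
    simp only [List.mem_range] at hk
    by_cases h1 : k = t
    · subst h1; simp [pvBinRow]
    · by_cases h2 : k < t <;> simp [h1, h2] <;> omega

def pvPrev (m : Nat) (park : List (List String)) : Nat → List Int
  | 0 => List.replicate m 0
  | i+1 => (pvFinRows m (List.replicate m 0) park).getD i []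

def pvRowVals (m : Nat) (park : List (List String)) (i : Nat) : List Int :=
  pvFinRow m (pvPrev m park i) (park.getD i [])

def pvSkip (i j : Nat) (row : List String) : Bool :=
  (row.getD j "" == "-1") && (i == 0 || j == 0)

def pvContrib (m : Nat) (park : List (List String)) (i : Nat) : List Int :=
  ((List.range m).filter (fun j => !pvSkip i j (park.getD i []))).map
    (pvFinVal (pvPrev m park i) (park.getD i []))

lemma pv_getD_nonneg (l : List Int) (hl : ∀ x ∈ l, 0 ≤ x) (k : Nat) : 0 ≤ l.getD k 0 := by
  unfold List.getD
  cases h : l[k]? with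
  | none => simp
  | some x => simpa using hl x (by exact List.mem_of_getElem? h)

lemma pvFinVal_nonneg (prev : List Int) (row : List String)
    (hp : ∀ k, 0 ≤ prev.getD k 0) (j : Nat) : 0 ≤ pvFinVal prev row j := by
  induction j with
  | zero => simp only [pvFinVal]; have := hp 0; split <;> omega
  | succ j ih => simp only [pvFinVal]; have := hp j; have := hp (j+1); split <;> omega

lemma pvFinRow_getD_nonneg (m : Nat) (prev : List Int) (row : List String)
    (hp : ∀ k, 0 ≤ prev.getD k 0) (k : Nat) : 0 ≤ (pvFinRow m prev row).getD k 0 := by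
  apply pv_getD_nonneg
  intro x hx
  simp only [pvFinRow, List.mem_map] at hx
  obtain ⟨j, _, rfl⟩ := hx
  exact pvFinVal_nonneg prev row hp j

lemma pvFinRows_getD_succ (m : Nat) (park : List (List String)) (prev : List Int) (i : Nat)
    (h : i + 1 < park.length) :
    (pvFinRows m prev park).getD (i+1) [] =
      pvFinRow m ((pvFinRows m prev park).getD i []) (park.getD (i+1) []) := by
  induction park generalizing prev i with
  | nil => simp at h
  | cons r rs ih =>
    cases i with
    | zero =>
      simp only [List.length_cons] at h
      cases rs with
      | nil => simp at h
      | cons r' rs' => simp [pvFinRows]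
    | succ i' =>
      simp only [pvFinRows, List.getD_cons_succ]
      exact ih _ i' (by simpa using h)

lemma pvFinRows_getD_eq_rowVals (m : Nat) (park : List (List String)) (i : Nat)
    (h : i < park.length) :
    (pvFinRows m (List.replicate m 0) park).getD i [] = pvRowVals m park i := by
  cases i with
  | zero =>
    cases park with
    | nil => simp at h
    | cons r rs => simp [pvFinRows, pvRowVals, pvPrev]
  | succ i' =>
    rw [pvFinRows_getD_succ m park _ i' h]
    rfl

lemma pvPrev_getD_nonneg (m : Nat) (park : List (List String)) (i : Nat) (k : Nat) :
    0 ≤ (pvPrev m park i).getD k 0 := by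
  induction i generalizing k with
  | zero =>
    apply pv_getD_nonneg
    intro x hx
    have := List.eq_of_mem_replicate hx
    omega
  | succ i' ih =>
    show 0 ≤ ((pvFinRows m (List.replicate m 0) park).getD i' []).getD k 0
    by_cases h : i' < park.length
    · rw [pvFinRows_getD_eq_rowVals m park i' h]
      exact pvFinRow_getD_nonneg m _ _ ih k
    · have hlen : (pvFinRows m (List.replicate m 0) park).length = park.length := by
        clear ih h
        generalize (List.replicate m (0:Int)) = p
        induction park generalizing p with
        | nil => rfl
        | cons r rs ih2 => simp [pvFinRows, ih2]
      have : (pvFinRows m (List.replicate m 0) park).getD i' [] = [] :=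
        List.getD_eq_default _ _ (by omega)
      rw [this]
      simp

lemma pvFinVal_not_cell (prev : List Int) (row : List String) (j : Nat)
    (h : (row.getD j "" == "-1") = false) : pvFinVal prev row j = 0 := by
  have h' : ¬ (row.getD j "" = "-1") := by simpa using h
  cases j <;> simp_all [pvFinVal]

lemma pvFinVal_cell_pos (prev : List Int) (row : List String) (hp : ∀ k, 0 ≤ prev.getD k 0)
    (j : Nat) (h : (row.getD j "" == "-1") = true) : 1 ≤ pvFinVal prev row j := by
  cases j with
  | zero => simp only [pvFinVal, h, if_true]; have := hp 0; omega
  | succ j' =>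
    simp only [pvFinVal, h, if_true]
    have := hp j'; have := hp (j'+1)
    have := pvFinVal_nonneg prev row hp j'
    omega

lemma pvFinVal_j0_cell (prev : List Int) (row : List String) (hp : ∀ k, 0 ≤ prev.getD k 0)
    (h : (row.getD 0 "" == "-1") = true) : pvFinVal prev row 0 = 1 := by
  simp only [pvFinVal, h, if_true]
  have := hp 0; omega

lemma pvFinVal_zero_prev (prev : List Int) (row : List String)
    (hp : ∀ k, prev.getD k 0 = 0) (j : Nat)
    (h : (row.getD j "" == "-1") = true) : pvFinVal prev row j = 1 := by
  have hp' : ∀ k, 0 ≤ prev.getD k 0 := fun k => (hp k).ge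
  cases j with
  | zero => exact pvFinVal_j0_cell prev row hp' h
  | succ j' =>
    simp only [pvFinVal, h, if_true, hp j', hp (j'+1)]
    have := pvFinVal_nonneg prev row hp' j'
    omega

def pvRowRep (m : Nat) (prev : List Int) (row : List String) (j : Nat) : List Int :=
  (List.range m).map (fun jj => if jj < j then pvFinVal prev row jj
                                else if row.getD jj "" == "-1" then (1:Int) else 0)

def pvDpRep (m : Nat) (park : List (List String)) (i j : Nat) : List (List Int) :=
  (List.range park.length).map (fun k =>
    if k < i then pvRowVals m park k
    else if k = i then pvRowRep m (pvPrev m park i) (park.getD i []) j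
    else pvBinRow m (park.getD k []))

lemma pvDpRep_getD_i (m : Nat) (park : List (List String)) (i j : Nat) (hi : i < park.length) :
    (pvDpRep m park i j).getD i [] = pvRowRep m (pvPrev m park i) (park.getD i []) j := by
  unfold pvDpRep
  rw [PySem.List.getD_map_range _ _ _ _ hi]
  simp

lemma pvDpRep_getD_pred (m : Nat) (park : List (List String)) (i j : Nat)
    (hi : i < park.length) (h0 : 0 < i) :
    (pvDpRep m park i j).getD (i-1) [] = pvPrev m park i := by
  unfold pvDpRep
  rw [PySem.List.getD_map_range _ _ _ _ (by omega : i - 1 < park.length)]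
  rw [if_pos (by omega : i - 1 < i)]
  obtain ⟨i', rfl⟩ : ∃ i', i = i' + 1 := ⟨i - 1, by omega⟩
  simp only [Nat.add_sub_cancel]
  show pvRowVals m park i' = pvPrev m park (i'+1)
  rw [← pvFinRows_getD_eq_rowVals m park i' (by omega)]
  rfl

lemma pvRowRep_getD (m : Nat) (prev : List Int) (row : List String) (j k : Nat) (hk : k < m) :
    (pvRowRep m prev row j).getD k 0 =
      if k < j then pvFinVal prev row k else if row.getD k "" == "-1" then (1:Int) else 0 := by
  unfold pvRowRep
  rw [PySem.List.getD_map_range _ _ _ _ hk]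

lemma pv_replicate_getD (m k : Nat) : (List.replicate m (0:Int)).getD k 0 = 0 := by
  by_cases h : k < m
  · exact List.getD_replicate 0 h
  · exact List.getD_eq_default _ _ (by simpa using Nat.le_of_not_lt h)

lemma pvRowRep_succ_eq (m : Nat) (prev : List Int) (row : List String) (j : Nat)
    (h : pvFinVal prev row j = if row.getD j "" == "-1" then (1:Int) else 0) :
    pvRowRep m prev row (j+1) = pvRowRep m prev row j := by
  unfold pvRowRep
  apply List.map_congr_left
  intro jj _
  by_cases h1 : jj = j
  · subst h1
    rw [if_pos (by omega), if_neg (by omega), h]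
  · simp only [show (jj < j + 1) ↔ (jj < j) from by omega]

lemma pvDpRep_succ_eq (m : Nat) (park : List (List String)) (i j : Nat)
    (h : pvFinVal (pvPrev m park i) (park.getD i []) j =
         if (park.getD i []).getD j "" == "-1" then (1:Int) else 0) :
    pvDpRep m park i (j+1) = pvDpRep m park i j := by
  unfold pvDpRep
  rw [pvRowRep_succ_eq m _ _ j h]

lemma pvA_phase2_inner (m : Nat) (park : List (List String)) (i : Nat) (hi : i < park.length)
    (j : Nat) (hj : j ≤ m) (ml0 : Int) :
    (List.range j).foldl (fun (st : List (List Int) × Int) j =>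
        let dp := st.1
        if (dp.getD i []).getD j 0 == 1 then
          if i == 0 || j == 0 then st
          else
            let a := (dp.getD (i-1) []).getD (j-1) 0
            let b := (dp.getD i []).getD (j-1) 0
            let c := (dp.getD (i-1) []).getD j 0
            let dp' := if a != 0 && b != 0 && c != 0 then
                dp.set i ((dp.getD i []).set j (min (min a b) c + 1))
              else dp
            (dp', max st.2 ((dp'.getD i []).getD j 0))
        else (dp, max st.2 ((dp.getD i []).getD j 0))) (pvDpRep m park i 0, ml0)
    = (pvDpRep m park i j,
       (((List.range j).filter (fun jj => !pvSkip i jj (park.getD i []))).map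
          (pvFinVal (pvPrev m park i) (park.getD i []))).foldl max ml0) := by
  induction j with
  | zero => simp
  | succ j ih =>
    have hj' : j < m := hj
    rw [List.range_succ, List.foldl_append, ih (by omega)]
    rw [List.filter_append, List.map_append, List.foldl_append]
    simp only [List.foldl_cons, List.foldl_nil, List.filter_cons, List.filter_nil]
    try dsimp only
    have hp : ∀ k, 0 ≤ (pvPrev m park i).getD k 0 := pvPrev_getD_nonneg m park i
    have hgetd : (pvDpRep m park i j).getD i [] = pvRowRep m (pvPrev m park i) (park.getD i []) j :=
      pvDpRep_getD_i m park i j hi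
    have hread : (pvRowRep m (pvPrev m park i) (park.getD i []) j).getD j 0 =
        (if (park.getD i []).getD j "" == "-1" then (1:Int) else 0) := by
      rw [pvRowRep_getD m _ _ j j hj']
      simp
    by_cases hc : ((park.getD i []).getD j "" == "-1") = true
    · have hcP : (park.getD i []).getD j "" = "-1" := by simpa using hc
      by_cases hbd : (i == 0 || j == 0) = true
      · -- border cell: skipped entirely
        have hfv : pvFinVal (pvPrev m park i) (park.getD i []) j = 1 := by
          rcases Bool.or_eq_true_iff.mp hbd with h0 | h0
          · have hi0 : i = 0 := by simpa using h0
            subst hi0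
            exact pvFinVal_zero_prev _ _ (fun k => pv_replicate_getD m k) j hc
          · have hj0 : j = 0 := by simpa using h0
            subst hj0
            exact pvFinVal_j0_cell _ _ hp hc
        have hbdP : i = 0 ∨ j = 0 := by simpa using hbd
        have hskip : pvSkip i j (park.getD i []) = true := by
          unfold pvSkip; rw [hc]
          rcases hbdP with h0 | h0 <;> simp [h0]
        have hcond : (((pvDpRep m park i j).getD i []).getD j 0 == 1) = true := by
          rw [hgetd, hread]; simp; exact hcP
        rw [hcond, if_pos rfl, hbd, if_pos rfl]
        have hone : pvFinVal (pvPrev m park i) (park.getD i []) j =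
            if (park.getD i []).getD j "" == "-1" then (1:Int) else 0 := by
          rw [hfv, if_pos hc]
        rw [pvDpRep_succ_eq m park i j hone]
        simp [show pvSkip i j (park[i]?.getD []) = true from hskip]
      · -- interior cell
        have hbd' : i ≠ 0 ∧ j ≠ 0 := by
          have := hbd
          simp only [Bool.or_eq_true_iff, beq_iff_eq, not_or] at this
          exact this
        have hpred : (pvDpRep m park i j).getD (i-1) [] = pvPrev m park i :=
          pvDpRep_getD_pred m park i j hi (by omega)
        have hb : ((pvDpRep m park i j).getD i []).getD (j-1) 0 =
            pvFinVal (pvPrev m park i) (park.getD i []) (j-1) := by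
          rw [hgetd, pvRowRep_getD m _ _ j (j-1) (by omega)]
          rw [if_pos (by omega : j - 1 < j)]
        obtain ⟨j', rfl⟩ : ∃ j', j = j' + 1 := ⟨j - 1, by omega⟩
        simp only [Nat.add_sub_cancel] at hb
        have hfveq : pvFinVal (pvPrev m park i) (park.getD i []) (j'+1) =
            min (min (pvFinVal (pvPrev m park i) (park.getD i []) j')
              ((pvPrev m park i).getD (j'+1) 0)) ((pvPrev m park i).getD j' 0) + 1 := by
          simp only [pvFinVal, hc, if_true]
        have hbnn : 0 ≤ pvFinVal (pvPrev m park i) (park.getD i []) j' :=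
          pvFinVal_nonneg _ _ hp j'
        have hskip : pvSkip i (j'+1) (park.getD i []) = false := by
          unfold pvSkip; rw [hc]; simp [hbd'.1]
        have hcond : (((pvDpRep m park i (j'+1)).getD i []).getD (j'+1) 0 == 1) = true := by
          rw [hgetd, hread]; simp; exact hcP
        rw [hcond, if_pos rfl, if_neg hbd]
        simp only [Nat.add_sub_cancel]
        rw [hpred, hb]
        by_cases hg : (((pvPrev m park i).getD j' 0 != 0) &&
            (pvFinVal (pvPrev m park i) (park.getD i []) j' != 0) &&
            ((pvPrev m park i).getD (j'+1) 0 != 0)) = true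
        · have hval : min (min ((pvPrev m park i).getD j' 0)
              (pvFinVal (pvPrev m park i) (park.getD i []) j'))
              ((pvPrev m park i).getD (j'+1) 0) + 1 =
              pvFinVal (pvPrev m park i) (park.getD i []) (j'+1) := by
            rw [hfveq]; omega
          have hset : (pvDpRep m park i (j'+1)).set i
              ((pvRowRep m (pvPrev m park i) (park.getD i []) (j'+1)).set (j'+1)
                (min (min ((pvPrev m park i).getD j' 0)
                  (pvFinVal (pvPrev m park i) (park.getD i []) j'))
                  ((pvPrev m park i).getD (j'+1) 0) + 1)) =
              pvDpRep m park i (j'+2) := by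
            rw [hval]
            unfold pvRowRep
            rw [pv_set_map_range m _ (j'+1) _ hj']
            unfold pvDpRep
            rw [pv_set_map_range park.length _ i _ hi]
            apply List.map_congr_left
            intro k _
            by_cases hk : k = i
            · simp only [hk]
              simp only [if_true]
              rw [if_neg (lt_irrefl i)]
              unfold pvRowRep
              apply List.map_congr_left
              intro jj _
              by_cases h1 : jj = j' + 1
              · subst h1
                rw [if_pos rfl, if_pos (by omega)]
              · rw [if_neg h1]
                simp only [show (jj < j' + 2) ↔ (jj < j' + 1) from by omega]
            · simp [hk]
          rw [hg, if_pos rfl, hgetd, hset]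
          have hgd2 : (pvDpRep m park i (j'+2)).getD i [] =
              pvRowRep m (pvPrev m park i) (park.getD i []) (j'+2) :=
            pvDpRep_getD_i m park i (j'+2) hi
          rw [hgd2, pvRowRep_getD m _ _ (j'+2) (j'+1) hj', if_pos (by omega)]
          simp [show pvSkip i (j'+1) (park[i]?.getD []) = false from hskip]
        · -- guard false: value stays 1
          have hg' : ¬(((pvPrev m park i).getD j' 0 ≠ 0 ∧
              pvFinVal (pvPrev m park i) (park.getD i []) j' ≠ 0) ∧
              (pvPrev m park i).getD (j'+1) 0 ≠ 0) := by
            simpa using hg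
          have hfv1 : pvFinVal (pvPrev m park i) (park.getD i []) (j'+1) = 1 := by
            rw [hfveq]
            have h1 := hp j'; have h2 := hp (j'+1)
            omega
          have hgF : (((pvPrev m park i).getD j' 0 != 0) &&
              (pvFinVal (pvPrev m park i) (park.getD i []) j' != 0) &&
              ((pvPrev m park i).getD (j'+1) 0 != 0)) = false := by
            simpa using hg
          have hone2 : pvFinVal (pvPrev m park i) (park.getD i []) (j'+1) =
              if (park.getD i []).getD (j'+1) "" == "-1" then (1:Int) else 0 := by
            rw [hfv1, if_pos hc]
          rw [hgF, if_neg (by simp), pvDpRep_succ_eq m park i (j'+1) hone2]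
          rw [hgetd, pvRowRep_getD m _ _ (j'+1) (j'+1) hj', if_neg (by omega)]
          have : (if ((park.getD i []).getD (j'+1) "" == "-1") = true then (1:Int) else 0) = 1 := by
            rw [if_pos hc]
          rw [this]
          simp [show pvSkip i (j'+1) (park[i]?.getD []) = false from hskip,
            show pvFinVal (pvPrev m park i) (park[i]?.getD []) (j'+1) = 1 from hfv1]
    · -- no cell: value 0
      have hc' : ((park.getD i []).getD j "" == "-1") = false := by simpa using hc
      have hcp : ¬ (park.getD i []).getD j "" = "-1" := by simpa using hc'
      have hfv : pvFinVal (pvPrev m park i) (park.getD i []) j = 0 :=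
        pvFinVal_not_cell _ _ j hc'
      have hskip : pvSkip i j (park.getD i []) = false := by unfold pvSkip; rw [hc']; simp
      have hz : (if ((park.getD i []).getD j "" == "-1") = true then (1:Int) else 0) = 0 := by
        rw [if_neg (by simpa using hc')]
      have hone3 : pvFinVal (pvPrev m park i) (park.getD i []) j =
          if (park.getD i []).getD j "" == "-1" then (1:Int) else 0 := by
        rw [hfv, hz]
      have hcond0 : (((pvDpRep m park i j).getD i []).getD j 0 == 1) = false := by
        rw [hgetd, hread, hz]; decide
      rw [hcond0, if_neg (by simp)]
      rw [pvDpRep_succ_eq m park i j hone3]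
      rw [hgetd, pvRowRep_getD m _ _ j j hj', if_neg (by omega), hz]
      simp [show pvSkip i j (park[i]?.getD []) = false from hskip,
        show pvFinVal (pvPrev m park i) (park[i]?.getD []) j = 0 from hfv]

def pvOuterRep (m : Nat) (park : List (List String)) (t : Nat) : List (List Int) :=
  (List.range park.length).map (fun k =>
    if k < t then pvRowVals m park k else pvBinRow m (park.getD k []))

lemma pvRowRep_zero (m : Nat) (prev : List Int) (row : List String) :
    pvRowRep m prev row 0 = pvBinRow m row := by
  unfold pvRowRep pvBinRow
  apply List.map_congr_left
  intro jj _
  rw [if_neg (by omega)]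

lemma pvRowRep_full (m : Nat) (prev : List Int) (row : List String) :
    pvRowRep m prev row m = pvFinRow m prev row := by
  unfold pvRowRep pvFinRow
  apply List.map_congr_left
  intro jj hjj
  rw [if_pos (by simpa using hjj)]

lemma pvDpRep_zero (m : Nat) (park : List (List String)) (i : Nat) :
    pvDpRep m park i 0 = pvOuterRep m park i := by
  unfold pvDpRep pvOuterRep
  apply List.map_congr_left
  intro k _
  by_cases h1 : k < i
  · simp [h1]
  · by_cases h2 : k = i
    · subst h2
      simp [h1, pvRowRep_zero]
    · simp [h1, h2]

lemma pvDpRep_full (m : Nat) (park : List (List String)) (i : Nat) :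
    pvDpRep m park i m = pvOuterRep m park (i+1) := by
  unfold pvDpRep pvOuterRep
  apply List.map_congr_left
  intro k _
  by_cases h1 : k < i
  · rw [if_pos h1, if_pos (by omega)]
  · by_cases h2 : k = i
    · subst h2
      rw [if_neg h1, if_pos rfl, if_pos (by omega), pvRowRep_full]
      rfl
    · rw [if_neg h1, if_neg h2, if_neg (by omega)]

lemma pvA_phase2 (m : Nat) (park : List (List String)) (t : Nat) (ht : t ≤ park.length) :
    (List.range t).foldl (fun (st : List (List Int) × Int) i =>
      (List.range m).foldl (fun (st : List (List Int) × Int) j =>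
        let dp := st.1
        if (dp.getD i []).getD j 0 == 1 then
          if i == 0 || j == 0 then st
          else
            let a := (dp.getD (i-1) []).getD (j-1) 0
            let b := (dp.getD i []).getD (j-1) 0
            let c := (dp.getD (i-1) []).getD j 0
            let dp' := if a != 0 && b != 0 && c != 0 then
                dp.set i ((dp.getD i []).set j (min (min a b) c + 1))
              else dp
            (dp', max st.2 ((dp'.getD i []).getD j 0))
        else (dp, max st.2 ((dp.getD i []).getD j 0))) st)
      (pvOuterRep m park 0, 0)
    = (pvOuterRep m park t,
       ((List.range t).flatMap (fun i => pvContrib m park i)).foldl max 0) := by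
  induction t with
  | zero => simp
  | succ t ih =>
    rw [List.range_succ, List.foldl_append, ih (by omega)]
    simp only [List.foldl_cons, List.foldl_nil]
    rw [← pvDpRep_zero m park t]
    rw [pvA_phase2_inner m park t (by omega) m le_rfl]
    rw [pvDpRep_full m park t]
    rw [List.flatMap_append, List.foldl_append]
    simp [pvContrib, pvFinRow]

def pvMlA' (m : Nat) (park : List (List String)) : Int :=
  ((List.range park.length).flatMap (fun i => pvContrib m park i)).foldl max 0

def pvPick (mats : List Int) (L : Int) : Int :=
  match (PySem.List.sorted mats (fun x => x) true).find? (fun mat => decide (mat ≤ L)) with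
  | some mat => mat
  | none => -1

lemma solution_eq (mats : List Int) (park : List (List String)) :
    solution mats park = pvPick mats (pvMlA' (park.headD []).length park) := by
  have hbin : (List.range park.length).map
      (fun i => if i < park.length then pvBinRow (park.headD []).length (park.getD i []) else []) =
      pvOuterRep (park.headD []).length park 0 := by
    unfold pvOuterRep
    apply List.map_congr_left
    intro k hk
    rw [if_pos (by simpa using hk), if_neg (by omega)]
  unfold solution pvPick
  simp only [pvA_phase1 (park.headD []).length park.length park park.length le_rfl,
    hbin, pvA_phase2 (park.headD []).length park park.length le_rfl]
  rfl

-- ---- B-side: prefix sums, window sums, and squares ----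

def pvOneB (park : List (List String)) (i j : Nat) : Bool :=
  (park.getD i []).getD j "" == "-1"

def pvOneI (park : List (List String)) (i j : Nat) : Int :=
  if pvOneB park i j then 1 else 0

def pvRowSeg (park : List (List String)) (i j w : Nat) : Int :=
  ((List.range w).map (fun b => pvOneI park i (j+b))).sum

def pvCnt (park : List (List String)) (i j : Nat) : Int :=
  ((List.range i).map (fun a => pvRowSeg park a 0 j)).sum

def pvSq (park : List (List String)) (ti tj s : Nat) : Prop :=
  ∀ a < s, ∀ b < s, pvOneB park (ti+a) (tj+b) = true

def pvGood (park : List (List String)) (i j s : Nat) : Prop :=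
  ∃ ti tj, ti + s = i + 1 ∧ tj + s = j + 1 ∧ pvSq park ti tj s

def pvWin (park : List (List String)) (ti tj s : Nat) : Int :=
  pvCnt park (ti+s) (tj+s) - pvCnt park ti (tj+s) - pvCnt park (ti+s) tj + pvCnt park ti tj

def pvAnyW (park : List (List String)) (s : Nat) : Bool :=
  (List.range (park.length - s + 1)).any (fun i =>
    (List.range ((park.headD []).length - s + 1)).any (fun j =>
      pvWin park i j s == (s:Int) * (s:Int)))

def pvBest (park : List (List String)) : Nat → Int
  | 0 => 0
  | t+1 => if pvAnyW park (t+1) then ((t+1 : Nat) : Int) else pvBest park t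

lemma pv_sum_range_add (f : Nat → Int) (p q : Nat) :
    ((List.range (p+q)).map f).sum
      = ((List.range p).map f).sum + ((List.range q).map (fun a => f (p+a))).sum := by
  induction q with
  | zero => simp
  | succ q ih =>
    rw [show p + (q+1) = (p+q) + 1 from rfl, List.range_succ, List.range_succ]
    simp only [List.map_append, List.sum_append, List.map_cons, List.map_nil, List.sum_cons,
      List.sum_nil]
    omega

lemma pv_sum_sub {α : Type} (l : List α) (f g : α → Int) :
    (l.map f).sum - (l.map g).sum = (l.map (fun x => f x - g x)).sum := by
  induction l with
  | nil => simp
  | cons x xs ih => simp only [List.map_cons, List.sum_cons]; omega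

lemma pvCnt_zero_left (park : List (List String)) (j : Nat) : pvCnt park 0 j = 0 := by
  simp [pvCnt]

lemma pvCnt_zero_right (park : List (List String)) (i : Nat) : pvCnt park i 0 = 0 := by
  simp [pvCnt, pvRowSeg]

lemma pvRowSeg_succ (park : List (List String)) (i j w : Nat) :
    pvRowSeg park i j (w+1) = pvRowSeg park i j w + pvOneI park i (j+w) := by
  unfold pvRowSeg
  rw [List.range_succ]
  simp

lemma pvCnt_succ (park : List (List String)) (i j : Nat) :
    pvCnt park (i+1) j = pvCnt park i j + pvRowSeg park i 0 j := by
  unfold pvCnt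
  rw [List.range_succ]
  simp

lemma pvCnt_rec (park : List (List String)) (i j : Nat) :
    pvCnt park (i+1) (j+1)
      = pvCnt park i (j+1) + pvCnt park (i+1) j - pvCnt park i j + pvOneI park i j := by
  rw [pvCnt_succ, pvCnt_succ, pvRowSeg_succ]
  simp only [Nat.zero_add]
  omega

lemma pvCnt_add_left (park : List (List String)) (ti s j : Nat) :
    pvCnt park (ti+s) j
      = pvCnt park ti j + ((List.range s).map (fun a => pvRowSeg park (ti+a) 0 j)).sum := by
  unfold pvCnt
  rw [pv_sum_range_add]

lemma pvRowSeg_split (park : List (List String)) (i tj s : Nat) :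
    pvRowSeg park i 0 (tj+s) = pvRowSeg park i 0 tj + pvRowSeg park i tj s := by
  unfold pvRowSeg
  rw [pv_sum_range_add]
  simp [Nat.zero_add]

lemma pvWin_eq (park : List (List String)) (ti tj s : Nat) :
    pvWin park ti tj s = ((List.range s).map (fun a => pvRowSeg park (ti+a) tj s)).sum := by
  have hs : ((List.range s).map (fun a => pvRowSeg park (ti+a) 0 (tj+s))).sum
      - ((List.range s).map (fun a => pvRowSeg park (ti+a) 0 tj)).sum
      = ((List.range s).map (fun a => pvRowSeg park (ti+a) tj s)).sum := by
    rw [pv_sum_sub]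
    congr 1
    apply List.map_congr_left
    intro a _
    have := pvRowSeg_split park (ti+a) tj s
    omega
  unfold pvWin
  rw [pvCnt_add_left park ti s (tj+s), pvCnt_add_left park ti s tj]
  omega

lemma pv_sum_le (l : List Int) (c : Int) (h : ∀ x ∈ l, x ≤ c) : l.sum ≤ c * l.length := by
  induction l with
  | nil => simp
  | cons x xs ih =>
    simp only [List.sum_cons, List.length_cons]
    have h1 := h x List.mem_cons_self
    have h2 := ih (fun y hy => h y (List.mem_cons_of_mem _ hy))
    have h3 : c * ((xs.length : Int) + 1) = c * xs.length + c := by ring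
    push_cast
    push_cast at h2
    omega

lemma pv_sum_eq_iff (l : List Int) (c : Int) (h : ∀ x ∈ l, x ≤ c) :
    l.sum = c * l.length ↔ ∀ x ∈ l, x = c := by
  induction l with
  | nil => simp
  | cons x xs ih =>
    simp only [List.sum_cons, List.length_cons]
    have h1 := h x List.mem_cons_self
    have htail : ∀ y ∈ xs, y ≤ c := fun y hy => h y (List.mem_cons_of_mem _ hy)
    have h2 := pv_sum_le xs c htail
    have h3 : c * (((xs.length : Int)) + 1) = c * xs.length + c := by ring
    constructor
    · intro he
      push_cast at he
      have hx : x = c := by omega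
      have hxs : xs.sum = c * xs.length := by omega
      intro y hy
      rcases List.mem_cons.mp hy with rfl | hy'
      · exact hx
      · exact ((ih htail).mp hxs) y hy'
    · intro hall
      have hx : x = c := hall x List.mem_cons_self
      have hxs : xs.sum = c * xs.length :=
        (ih htail).mpr (fun y hy => hall y (List.mem_cons_of_mem _ hy))
      push_cast
      omega

lemma pvOneI_le_one (park : List (List String)) (i j : Nat) : pvOneI park i j ≤ 1 := by
  unfold pvOneI; split <;> omega

lemma pvOneI_eq_one_iff (park : List (List String)) (i j : Nat) :
    pvOneI park i j = 1 ↔ pvOneB park i j = true := by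
  unfold pvOneI; split <;> simp_all

lemma pvRowSeg_le (park : List (List String)) (i j w : Nat) : pvRowSeg park i j w ≤ w := by
  have := pv_sum_le ((List.range w).map (fun b => pvOneI park i (j+b))) 1 (by
    intro x hx
    rcases List.mem_map.mp hx with ⟨b, _, rfl⟩
    exact pvOneI_le_one park i (j+b))
  simpa [pvRowSeg] using this

lemma pvRowSeg_eq_iff (park : List (List String)) (i j w : Nat) :
    pvRowSeg park i j w = w ↔ ∀ b < w, pvOneB park i (j+b) = true := by
  have hle : ∀ x ∈ (List.range w).map (fun b => pvOneI park i (j+b)), x ≤ 1 := by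
    intro x hx
    rcases List.mem_map.mp hx with ⟨b, _, rfl⟩
    exact pvOneI_le_one park i (j+b)
  have := pv_sum_eq_iff ((List.range w).map (fun b => pvOneI park i (j+b))) 1 hle
  simp only [List.length_map, List.length_range, one_mul] at this
  unfold pvRowSeg
  rw [this]
  constructor
  · intro hall b hb
    exact (pvOneI_eq_one_iff park i (j+b)).mp
      (hall _ (List.mem_map.mpr ⟨b, List.mem_range.mpr hb, rfl⟩))
  · intro hall x hx
    rcases List.mem_map.mp hx with ⟨b, hb, rfl⟩
    exact (pvOneI_eq_one_iff park i (j+b)).mpr (hall b (List.mem_range.mp hb))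

lemma pvWin_eq_iff (park : List (List String)) (ti tj s : Nat) :
    (pvWin park ti tj s = (s:Int) * (s:Int)) ↔ pvSq park ti tj s := by
  rw [pvWin_eq]
  have hle : ∀ x ∈ (List.range s).map (fun a => pvRowSeg park (ti+a) tj s), x ≤ (s:Int) := by
    intro x hx
    rcases List.mem_map.mp hx with ⟨a, _, rfl⟩
    simpa using pvRowSeg_le park (ti+a) tj s
  have h := pv_sum_eq_iff ((List.range s).map (fun a => pvRowSeg park (ti+a) tj s)) (s:Int) hle
  simp only [List.length_map, List.length_range] at h
  rw [h]
  unfold pvSq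
  constructor
  · intro hall a ha b hb
    have := hall _ (List.mem_map.mpr ⟨a, List.mem_range.mpr ha, rfl⟩)
    exact (pvRowSeg_eq_iff park (ti+a) tj s).mp (by exact_mod_cast this) b hb
  · intro hall x hx
    rcases List.mem_map.mp hx with ⟨a, ha, rfl⟩
    have := (pvRowSeg_eq_iff park (ti+a) tj s).mpr (fun b hb => hall a (List.mem_range.mp ha) b hb)
    exact_mod_cast this

-- ---- B-side: the prefix-sum table built by the double fold ----

def pvPCell (park : List (List String)) (i j r c : Nat) : Int :=
  if r ≤ i then pvCnt park r c
  else if r = i+1 ∧ c ≤ j then pvCnt park r c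
  else 0

def pvPTab (park : List (List String)) (n m i j : Nat) : List (List Int) :=
  (List.range (n+1)).map (fun r => (List.range (m+1)).map (fun c => pvPCell park i j r c))

lemma pvPTab_init (park : List (List String)) (n m : Nat) :
    List.replicate (n+1) (List.replicate (m+1) (0:Int)) = pvPTab park n m 0 0 := by
  apply List.ext_getElem
  · simp [pvPTab]
  · intro r h1 h2
    simp only [List.getElem_replicate, pvPTab, List.getElem_map, List.getElem_range]
    apply List.ext_getElem
    · simp
    · intro c h3 h4
      simp only [List.getElem_replicate, List.getElem_map, List.getElem_range]
      simp only [List.length_replicate] at h1 h3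
      unfold pvPCell
      split_ifs with ha hb
      · have : r = 0 := by omega
        subst this
        rw [pvCnt_zero_left]
      · have : c = 0 := by omega
        subst this
        rw [pvCnt_zero_right]
      · rfl

lemma pvPTab_getD (park : List (List String)) (n m i j r c : Nat)
    (hr : r < n+1) (hc : c < m+1) :
    ((pvPTab park n m i j).getD r []).getD c 0 = pvPCell park i j r c := by
  unfold pvPTab
  rw [PySem.List.getD_map_range _ _ _ _ hr, PySem.List.getD_map_range _ _ _ _ hc]

lemma pvB_ps_inner (park : List (List String)) (n m i : Nat) (hi : i < n) (t : Nat) (ht : t ≤ m) :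
    (List.range t).foldl (fun S j =>
        S.set (i+1) ((S.getD (i+1) []).set (j+1)
          ((S.getD i []).getD (j+1) 0 + (S.getD (i+1) []).getD j 0 - (S.getD i []).getD j 0
            + (if (park.getD i []).getD j "" == "-1" then (1:Int) else 0)))) (pvPTab park n m i 0)
    = pvPTab park n m i t := by
  induction t with
  | zero => simp
  | succ t ih =>
    rw [List.range_succ, List.foldl_append, ih (by omega)]
    simp only [List.foldl_cons, List.foldl_nil]
    have ht' : t < m := ht
    have hr1 : ((pvPTab park n m i t).getD i []).getD (t+1) 0 = pvCnt park i (t+1) := by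
      rw [pvPTab_getD park n m i t i (t+1) (by omega) (by omega)]
      unfold pvPCell
      rw [if_pos (le_refl i)]
    have hr2 : ((pvPTab park n m i t).getD (i+1) []).getD t 0 = pvCnt park (i+1) t := by
      rw [pvPTab_getD park n m i t (i+1) t (by omega) (by omega)]
      unfold pvPCell
      split_ifs <;> first | rfl | omega
    have hr3 : ((pvPTab park n m i t).getD i []).getD t 0 = pvCnt park i t := by
      rw [pvPTab_getD park n m i t i t (by omega) (by omega)]
      unfold pvPCell
      rw [if_pos (le_refl i)]
    rw [hr1, hr2, hr3]
    have hone : (if (park.getD i []).getD t "" == "-1" then (1:Int) else 0) = pvOneI park i t := rfl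
    rw [hone]
    have hval : pvCnt park i (t+1) + pvCnt park (i+1) t - pvCnt park i t + pvOneI park i t
        = pvCnt park (i+1) (t+1) := by
      have := pvCnt_rec park i t
      omega
    rw [hval]
    have hrow : (pvPTab park n m i t).getD (i+1) []
        = (List.range (m+1)).map (fun c => pvPCell park i t (i+1) c) := by
      unfold pvPTab
      rw [PySem.List.getD_map_range _ _ _ _ (by omega : i+1 < n+1)]
    rw [hrow, pv_set_map_range (m+1) _ (t+1) _ (by omega)]
    have hrow2 : (List.range (m+1)).map (fun c =>
        if c = t+1 then pvCnt park (i+1) (t+1) else pvPCell park i t (i+1) c)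
        = (List.range (m+1)).map (fun c => pvPCell park i (t+1) (i+1) c) := by
      apply List.map_congr_left
      intro c _
      by_cases hc : c = t+1
      · subst hc
        rw [if_pos rfl]
        unfold pvPCell
        split_ifs <;> first | rfl | omega
      · rw [if_neg hc]
        unfold pvPCell
        split_ifs <;> first | rfl | omega
    rw [hrow2]
    unfold pvPTab
    rw [pv_set_map_range (n+1) _ (i+1) _ (by omega)]
    apply List.map_congr_left
    intro r _
    by_cases hrr : r = i+1
    · subst hrr
      rw [if_pos rfl]
    · rw [if_neg hrr]
      apply List.map_congr_left
      intro c _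
      unfold pvPCell
      split_ifs <;> first | rfl | omega

lemma pvPTab_trans (park : List (List String)) (n m i : Nat) :
    pvPTab park n m i m = pvPTab park n m (i+1) 0 := by
  unfold pvPTab
  apply List.map_congr_left
  intro r _
  apply List.map_congr_left
  intro c hc
  have hc' : c ≤ m := by simpa [Nat.lt_succ_iff] using List.mem_range.mp hc
  unfold pvPCell
  split_ifs <;>
    first
      | rfl
      | omega
      | (have hc0 : c = 0 := by omega
         subst hc0
         rw [pvCnt_zero_right])

lemma pvB_ps_outer (park : List (List String)) (n m : Nat) (t : Nat) (ht : t ≤ n) :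
    (List.range t).foldl (fun S i =>
      (List.range m).foldl (fun S j =>
        S.set (i+1) ((S.getD (i+1) []).set (j+1)
          ((S.getD i []).getD (j+1) 0 + (S.getD (i+1) []).getD j 0 - (S.getD i []).getD j 0
            + (if (park.getD i []).getD j "" == "-1" then (1:Int) else 0)))) S)
      (pvPTab park n m 0 0)
    = pvPTab park n m t 0 := by
  induction t with
  | zero => simp
  | succ t ih =>
    rw [List.range_succ, List.foldl_append, ih (by omega)]
    simp only [List.foldl_cons, List.foldl_nil]
    rw [pvB_ps_inner park n m t (by omega) m le_rfl, pvPTab_trans]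

-- ---- B-side: the best-side fold of the port ----

lemma pv_any_congr {α : Type} (l : List α) (p q : α → Bool) (h : ∀ x ∈ l, p x = q x) :
    l.any p = l.any q := by
  induction l with
  | nil => rfl
  | cons x xs ih =>
    simp only [List.any_cons, h x List.mem_cons_self,
      ih (fun y hy => h y (List.mem_cons_of_mem _ hy))]

lemma pvB_best_fold (park : List (List String)) (t : Nat)
    (ht : t ≤ min park.length (park.headD []).length) :
    (List.range t).foldl (fun (best : Int) k =>
      if (List.range (park.length - (k+1) + 1)).any (fun i =>
          (List.range ((park.headD []).length - (k+1) + 1)).any (fun j =>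
            ((pvPTab park park.length (park.headD []).length park.length 0).getD (i+(k+1)) []).getD (j+(k+1)) 0
              - ((pvPTab park park.length (park.headD []).length park.length 0).getD i []).getD (j+(k+1)) 0
              - ((pvPTab park park.length (park.headD []).length park.length 0).getD (i+(k+1)) []).getD j 0
              + ((pvPTab park park.length (park.headD []).length park.length 0).getD i []).getD j 0
              == ((k+1 : Nat) : Int) * ((k+1 : Nat) : Int)))
      then ((k+1 : Nat) : Int) else best) 0
    = pvBest park t := by
  induction t with
  | zero => rfl
  | succ t ih =>
    rw [List.range_succ, List.foldl_append, ih (by omega)]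
    simp only [List.foldl_cons, List.foldl_nil]
    have hsn : t + 1 ≤ park.length :=
      le_trans ht (Nat.min_le_left _ _)
    have hsm : t + 1 ≤ (park.headD []).length :=
      le_trans ht (Nat.min_le_right _ _)
    have hcond : (List.range (park.length - (t+1) + 1)).any (fun i =>
        (List.range ((park.headD []).length - (t+1) + 1)).any (fun j =>
          ((pvPTab park park.length (park.headD []).length park.length 0).getD (i+(t+1)) []).getD (j+(t+1)) 0
            - ((pvPTab park park.length (park.headD []).length park.length 0).getD i []).getD (j+(t+1)) 0
            - ((pvPTab park park.length (park.headD []).length park.length 0).getD (i+(t+1)) []).getD j 0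
            + ((pvPTab park park.length (park.headD []).length park.length 0).getD i []).getD j 0
            == ((t+1 : Nat) : Int) * ((t+1 : Nat) : Int)))
        = pvAnyW park (t+1) := by
      unfold pvAnyW
      apply pv_any_congr
      intro i hi
      apply pv_any_congr
      intro j hj
      simp only [List.mem_range] at hi hj
      have r1 := pvPTab_getD park park.length (park.headD []).length park.length 0
        (i+(t+1)) (j+(t+1)) (by omega) (by omega)
      have r2 := pvPTab_getD park park.length (park.headD []).length park.length 0
        i (j+(t+1)) (by omega) (by omega)
      have r3 := pvPTab_getD park park.length (park.headD []).length park.length 0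
        (i+(t+1)) j (by omega) (by omega)
      have r4 := pvPTab_getD park park.length (park.headD []).length park.length 0
        i j (by omega) (by omega)
      rw [r1, r2, r3, r4]
      unfold pvPCell
      rw [if_pos (by omega : i + (t+1) ≤ park.length),
          if_pos (by omega : i ≤ park.length),
          if_pos (by omega : i + (t+1) ≤ park.length),
          if_pos (by omega : i ≤ park.length)]
      rfl
    rw [hcond]
    rfl

lemma solution_alt_eq (mats : List Int) (park : List (List String)) :
    solution_alt mats park
      = pvPick mats (pvBest park (min park.length (park.headD []).length)) := by
  unfold solution_alt pvPick
  simp only [pvPTab_init park park.length (park.headD []).length,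
    pvB_ps_outer park park.length (park.headD []).length park.length le_rfl,
    pvB_best_fold park (min park.length (park.headD []).length) le_rfl]

lemma pvAnyW_iff (park : List (List String)) (s : Nat) (hs1 : 1 ≤ s)
    (hsn : s ≤ park.length) (hsm : s ≤ (park.headD []).length) :
    pvAnyW park s = true ↔
      ∃ ti tj, ti + s ≤ park.length ∧ tj + s ≤ (park.headD []).length ∧ pvSq park ti tj s := by
  unfold pvAnyW
  simp only [List.any_eq_true, List.mem_range, beq_iff_eq]
  constructor
  · rintro ⟨i, hi, j, hj, hw⟩
    exact ⟨i, j, by omega, by omega, (pvWin_eq_iff park i j s).mp hw⟩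
  · rintro ⟨ti, tj, h1, h2, hsq⟩
    exact ⟨ti, by omega, tj, by omega, (pvWin_eq_iff park ti tj s).mpr hsq⟩

lemma pvBest_nonneg (park : List (List String)) (t : Nat) : 0 ≤ pvBest park t := by
  induction t with
  | zero => simp [pvBest]
  | succ t ih =>
    simp only [pvBest]
    split_ifs with h
    · omega
    · exact ih

lemma pvBest_ge (park : List (List String)) (s t : Nat) (h1 : 1 ≤ s) (hst : s ≤ t)
    (hA : pvAnyW park s = true) : (s : Int) ≤ pvBest park t := by
  induction t with
  | zero => omega
  | succ t ih =>
    simp only [pvBest]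
    split_ifs with h
    · push_cast
      omega
    · by_cases he : s = t + 1
      · subst he
        exact absurd hA h
      · exact ih (by omega)

lemma pvBest_cases (park : List (List String)) (t : Nat) :
    pvBest park t = 0 ∨
      ∃ s, 1 ≤ s ∧ s ≤ t ∧ pvAnyW park s = true ∧ pvBest park t = (s : Int) := by
  induction t with
  | zero => left; rfl
  | succ t ih =>
    simp only [pvBest]
    split_ifs with h
    · right; exact ⟨t+1, by omega, le_refl _, h, rfl⟩
    · rcases ih with h0 | ⟨s, a, b, c, d⟩
      · left; exact h0
      · right; exact ⟨s, a, by omega, c, d⟩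

-- ---- bridge: A's DP values describe exactly the all-free squares ----

def pvDpv (m : Nat) (park : List (List String)) (i j : Nat) : Int :=
  pvFinVal (pvPrev m park i) (park.getD i []) j

lemma pvDpv_zero_of_not (m : Nat) (park : List (List String)) (i j : Nat)
    (h : pvOneB park i j = false) : pvDpv m park i j = 0 :=
  pvFinVal_not_cell _ _ j h

lemma pvDpv_pos (m : Nat) (park : List (List String)) (i j : Nat)
    (h : pvOneB park i j = true) : 1 ≤ pvDpv m park i j :=
  pvFinVal_cell_pos _ _ (pvPrev_getD_nonneg m park i) j h

lemma pvDpv_row0 (m : Nat) (park : List (List String)) (j : Nat)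
    (h : pvOneB park 0 j = true) : pvDpv m park 0 j = 1 :=
  pvFinVal_zero_prev _ _ (fun k => pv_replicate_getD m k) j h

lemma pvDpv_col0 (m : Nat) (park : List (List String)) (i : Nat)
    (h : pvOneB park i 0 = true) : pvDpv m park i 0 = 1 :=
  pvFinVal_j0_cell _ _ (pvPrev_getD_nonneg m park i) h

lemma pvDpv_succ (m : Nat) (park : List (List String)) (i j : Nat)
    (hin : i + 1 < park.length) (hone : pvOneB park (i+1) (j+1) = true) (hjm : j + 1 < m) :
    pvDpv m park (i+1) (j+1)
      = min (min (pvDpv m park (i+1) j) (pvDpv m park i (j+1))) (pvDpv m park i j) + 1 := by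
  have hprev : pvPrev m park (i+1) = pvRowVals m park i := by
    show (pvFinRows m (List.replicate m 0) park).getD i [] = _
    exact pvFinRows_getD_eq_rowVals m park i (by omega)
  have hone' : ((park.getD (i+1) []).getD (j+1) "" == "-1") = true := hone
  unfold pvDpv
  have hstep : pvFinVal (pvPrev m park (i+1)) (park.getD (i+1) []) (j+1)
      = if (park.getD (i+1) []).getD (j+1) "" == "-1" then
          min (min (pvFinVal (pvPrev m park (i+1)) (park.getD (i+1) []) j)
            ((pvPrev m park (i+1)).getD (j+1) 0)) ((pvPrev m park (i+1)).getD j 0) + 1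
        else 0 := rfl
  rw [hstep, if_pos hone', hprev]
  have hg1 : (pvRowVals m park i).getD (j+1) 0
      = pvFinVal (pvPrev m park i) (park.getD i []) (j+1) := by
    unfold pvRowVals pvFinRow
    rw [PySem.List.getD_map_range _ _ _ _ (hjm : j+1 < m)]
  have hg2 : (pvRowVals m park i).getD j 0
      = pvFinVal (pvPrev m park i) (park.getD i []) j := by
    unfold pvRowVals pvFinRow
    rw [PySem.List.getD_map_range _ _ _ _ (by omega : j < m)]
  rw [hg1, hg2]

lemma pvGood_one (park : List (List String)) (i j s : Nat) (hs : 1 ≤ s)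
    (h : pvGood park i j s) : pvOneB park i j = true := by
  obtain ⟨ti, tj, h1, h2, hsq⟩ := h
  have hlt : s - 1 < s := by omega
  have hv := hsq (s-1) hlt (s-1) hlt
  have e1 : ti + (s-1) = i := by omega
  have e2 : tj + (s-1) = j := by omega
  rw [e1, e2] at hv
  exact hv

lemma pvGood_combine (park : List (List String)) (i j s : Nat)
    (hone : pvOneB park (i+1) (j+1) = true) :
    (pvGood park (i+1) j (s+1) ∧ pvGood park i (j+1) (s+1) ∧ pvGood park i j (s+1))
      ↔ pvGood park (i+1) (j+1) (s+2) := by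
  constructor
  · rintro ⟨⟨Li, Lj, hL1, hL2, hLs⟩, ⟨Ui, Uj, hU1, hU2, hUs⟩, ⟨Di, Dj, hD1, hD2, hDs⟩⟩
    refine ⟨Di, Dj, by omega, by omega, ?_⟩
    intro a ha b hb
    by_cases hA : a ≤ s <;> by_cases hB : b ≤ s
    · exact hDs a (by omega) b (by omega)
    · -- a ≤ s, b = s+1 : use the (i, j+1) square
      have h := hUs a (by omega) (b-1) (by omega)
      have e1 : Ui + a = Di + a := by omega
      have e2 : Uj + (b-1) = Dj + b := by omega
      rw [e1, e2] at h
      exact h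
    · -- a = s+1, b ≤ s : use the (i+1, j) square
      have h := hLs (a-1) (by omega) b (by omega)
      have e1 : Li + (a-1) = Di + a := by omega
      have e2 : Lj + b = Dj + b := by omega
      rw [e1, e2] at h
      exact h
    · -- a = s+1, b = s+1 : the cell itself
      have e1 : Di + a = i + 1 := by omega
      have e2 : Dj + b = j + 1 := by omega
      rw [e1, e2]
      exact hone
  · rintro ⟨Ti, Tj, h1, h2, hsq⟩
    refine ⟨⟨Ti+1, Tj, by omega, by omega, ?_⟩, ⟨Ti, Tj+1, by omega, by omega, ?_⟩,
      ⟨Ti, Tj, by omega, by omega, ?_⟩⟩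
    · intro a ha b hb
      have h := hsq (a+1) (by omega) b (by omega)
      have e1 : Ti + (a+1) = Ti + 1 + a := by omega
      rw [e1] at h
      exact h
    · intro a ha b hb
      have h := hsq a (by omega) (b+1) (by omega)
      have e2 : Tj + (b+1) = Tj + 1 + b := by omega
      rw [e2] at h
      exact h
    · intro a ha b hb
      exact hsq a (by omega) b (by omega)

lemma pvDpv_iff_notone (m : Nat) (park : List (List String)) (i j s : Nat)
    (hone : ¬ pvOneB park i j = true) :
    (((s+1 : Nat) : Int) ≤ pvDpv m park i j ↔ pvGood park i j (s+1)) := by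
  have hone' : pvOneB park i j = false := by
    cases h : pvOneB park i j
    · rfl
    · exact absurd h hone
  have hv : pvDpv m park i j = 0 := pvDpv_zero_of_not m park i j hone'
  constructor
  · intro hle
    rw [hv] at hle
    exfalso
    push_cast at hle
    omega
  · intro hg
    exact absurd (pvGood_one park i j (s+1) (by omega) hg) hone

lemma pvDpv_iff_border (m : Nat) (park : List (List String)) (i j : Nat)
    (hij : i = 0 ∨ j = 0) (s : Nat) :
    (((s+1 : Nat) : Int) ≤ pvDpv m park i j ↔ pvGood park i j (s+1)) := by
  by_cases hone : pvOneB park i j = true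
  · have hv : pvDpv m park i j = 1 := by
      rcases hij with rfl | rfl
      · exact pvDpv_row0 m park j hone
      · exact pvDpv_col0 m park i hone
    cases s with
    | zero =>
      constructor
      · intro _
        refine ⟨i, j, by omega, by omega, ?_⟩
        intro a ha b hb
        have ha0 : a = 0 := by omega
        have hb0 : b = 0 := by omega
        subst ha0; subst hb0
        simpa using hone
      · intro _
        rw [hv]
        norm_num
    | succ s =>
      constructor
      · intro hle
        rw [hv] at hle
        exfalso
        push_cast at hle
        omega
      · rintro ⟨ti, tj, h1, h2, _⟩
        exfalso
        rcases hij with rfl | rfl <;> omega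
  · exact pvDpv_iff_notone m park i j s hone

lemma pvDpv_iff (m : Nat) (park : List (List String)) :
    ∀ i, i < park.length → ∀ j, j < m → ∀ s : Nat,
      (((s+1 : Nat) : Int) ≤ pvDpv m park i j ↔ pvGood park i j (s+1)) := by
  intro i
  induction i with
  | zero => intro _ j _ s; exact pvDpv_iff_border m park 0 j (Or.inl rfl) s
  | succ i ihi =>
    intro hin j
    induction j with
    | zero => intro _ s; exact pvDpv_iff_border m park (i+1) 0 (Or.inr rfl) s
    | succ j ihj =>
      intro hjm s
      have hin' : i < park.length := by omega
      have hjm' : j < m := by omega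
      by_cases hone : pvOneB park (i+1) (j+1) = true
      · cases s with
        | zero =>
          constructor
          · intro _
            refine ⟨i+1, j+1, by omega, by omega, ?_⟩
            intro a ha b hb
            have ha0 : a = 0 := by omega
            have hb0 : b = 0 := by omega
            subst ha0; subst hb0
            simpa using hone
          · intro _
            have := pvDpv_pos m park (i+1) (j+1) hone
            push_cast
            omega
        | succ s =>
          show (((s+2 : Nat) : Int) ≤ pvDpv m park (i+1) (j+1) ↔ pvGood park (i+1) (j+1) (s+2))
          rw [pvDpv_succ m park i j hin hone hjm]
          rw [← pvGood_combine park i j s hone]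
          rw [← ihj hjm' s, ← ihi hin' (j+1) hjm s, ← ihi hin' j hjm' s]
          constructor
          · intro h
            have h' : ((s+1 : Nat) : Int) ≤
                min (min (pvDpv m park (i+1) j) (pvDpv m park i (j+1))) (pvDpv m park i j) := by
              push_cast at h ⊢
              omega
            rw [le_min_iff, le_min_iff] at h'
            exact ⟨h'.1.1, h'.1.2, h'.2⟩
          · rintro ⟨h1, h2, h3⟩
            have h' : ((s+1 : Nat) : Int) ≤
                min (min (pvDpv m park (i+1) j) (pvDpv m park i (j+1))) (pvDpv m park i j) := by
              rw [le_min_iff, le_min_iff]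
              exact ⟨⟨h1, h2⟩, h3⟩
            push_cast at h' ⊢
            omega
      · exact pvDpv_iff_notone m park (i+1) (j+1) s hone

-- ---- assembly ----

lemma pv_valsA_mem (m : Nat) (park : List (List String)) (v : Int)
    (hv : v ∈ (List.range park.length).flatMap (fun i => pvContrib m park i)) :
    ∃ i < park.length, ∃ j < m, pvSkip i j (park.getD i []) = false ∧
      v = pvFinVal (pvPrev m park i) (park.getD i []) j := by
  rcases List.mem_flatMap.mp hv with ⟨i, hi, hvi⟩
  rcases List.mem_map.mp hvi with ⟨j, hj, rfl⟩
  rcases List.mem_filter.mp hj with ⟨hj1, hj2⟩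
  exact ⟨i, by simpa using hi, j, by simpa using hj1, by simpa using hj2, rfl⟩

lemma pv_valsA_mem_of (m : Nat) (park : List (List String)) (i j : Nat)
    (hi : i < park.length) (hj : j < m) (hs : pvSkip i j (park.getD i []) = false) :
    pvFinVal (pvPrev m park i) (park.getD i []) j ∈
      (List.range park.length).flatMap (fun i => pvContrib m park i) := by
  apply List.mem_flatMap.mpr
  refine ⟨i, by simpa using hi, ?_⟩
  apply List.mem_map.mpr
  refine ⟨j, ?_, rfl⟩
  exact List.mem_filter.mpr ⟨by simpa using hj, by simpa using hs⟩

lemma pv_mlA_nonneg (m : Nat) (park : List (List String)) : 0 ≤ pvMlA' m park :=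
  (PySem.List.le_foldl_max _ _).1

lemma pv_mlA_zero (m : Nat) (park : List (List String))
    (h2 : ∀ i, i < park.length → ∀ j, j < m → pvOneB park i j = true → i = 0 ∨ j = 0) :
    pvMlA' m park = 0 := by
  unfold pvMlA'
  rcases PySem.List.foldl_max_mem ((List.range park.length).flatMap (fun i => pvContrib m park i)) 0 with h' | h'
  · exact h'
  · rcases pv_valsA_mem m park _ h' with ⟨i, hi, j, hj, hs, he⟩
    by_cases hc : pvOneB park i j = true
    · exfalso
      have hbd := h2 i hi j hj hc
      have hsk : pvSkip i j (park.getD i []) = true := by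
        unfold pvSkip
        rw [show ((park.getD i []).getD j "" == "-1") = true from hc]
        rcases hbd with rfl | rfl <;> simp
      rw [hsk] at hs
      exact Bool.true_eq_false.mp hs
    · rw [he]
      exact pvFinVal_not_cell _ _ j (by simpa [pvOneB] using hc)

def pvPickB (mats : List Int) (L : Int) : Int :=
  match PySem.List.max? (mats.filter (fun x => decide (x ≤ L))) (fun x => x) with
  | some x => x
  | none => -1

lemma pv_find_desc (L : Int) (s : List Int) (hs : s.Pairwise (fun a b => b ≤ a)) (x : Int)
    (hf : s.find? (fun v => decide (v ≤ L)) = some x) :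
    x ≤ L ∧ x ∈ s ∧ ∀ z ∈ s, z ≤ L → z ≤ x := by
  induction s with
  | nil => simp at hf
  | cons h t ih =>
    rcases List.pairwise_cons.mp hs with ⟨hh, ht⟩
    by_cases hp : h ≤ L
    · rw [List.find?_cons_of_pos (by simpa using hp)] at hf
      obtain rfl : h = x := by simpa using hf
      refine ⟨hp, List.mem_cons_self, ?_⟩
      intro z hz _
      rcases List.mem_cons.mp hz with rfl | hz'
      · exact le_refl z
      · exact hh z hz'
    · rw [List.find?_cons_of_neg (by simpa using hp)] at hf
      obtain ⟨h1, h2, h3⟩ := ih ht hf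
      refine ⟨h1, List.mem_cons_of_mem _ h2, ?_⟩
      intro z hz hzL
      rcases List.mem_cons.mp hz with rfl | hz'
      · exact absurd hzL hp
      · exact h3 z hz' hzL

lemma pvPick_eq_pickB (mats : List Int) (L : Int) : pvPick mats L = pvPickB mats L := by
  unfold pvPick pvPickB
  have hperm := PySem.List.sorted_perm mats (fun x => x) true
  have hpair := PySem.List.sorted_pairwise_rev mats (fun x => x)
  cases hf : (PySem.List.sorted mats (fun x => x) true).find? (fun v => decide (v ≤ L)) with
  | none =>
    have hnone : ∀ z ∈ mats, ¬ z ≤ L := by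
      intro z hz
      have hzs : z ∈ PySem.List.sorted mats (fun x => x) true := hperm.symm.mem_iff.mp hz
      have := List.find?_eq_none.mp hf z hzs
      simpa using this
    have hfil : mats.filter (fun x => decide (x ≤ L)) = [] := by
      rw [List.filter_eq_nil_iff]
      intro z hz
      simpa using hnone z hz
    rw [hfil]
    rfl
  | some x =>
    obtain ⟨hxL, hxs, hmax⟩ := pv_find_desc L _ hpair x hf
    have hxm : x ∈ mats.filter (fun v => decide (v ≤ L)) :=
      List.mem_filter.mpr ⟨hperm.mem_iff.mp hxs, by simpa using hxL⟩
    cases hm : PySem.List.max? (mats.filter (fun v => decide (v ≤ L))) (fun x => x) with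
    | none =>
      rw [PySem.List.max?_eq_none_iff] at hm
      rw [hm] at hxm
      simp at hxm
    | some y =>
      have hy := PySem.List.max?_mem hm
      have hymem := List.mem_filter.mp hy
      have hyx : y ≤ x := hmax y (hperm.symm.mem_iff.mp hymem.1) (by simpa using hymem.2)
      have hxy : x ≤ y := PySem.List.max?_isMax hm x hxm
      simp [le_antisymm hyx hxy]

lemma pvPickB_zero_one (mats : List Int) (h : (1:Int) ∉ mats) :
    pvPickB mats 0 = pvPickB mats 1 := by
  unfold pvPickB
  have hfil : mats.filter (fun x => decide (x ≤ (0:Int))) =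
      mats.filter (fun x => decide (x ≤ (1:Int))) := by
    apply List.filter_congr
    intro x hx
    have hx1 : x ≠ 1 := fun he => h (he ▸ hx)
    simp only [decide_eq_decide]
    omega
  rw [hfil]

lemma pvPickB_one_mem (mats : List Int) (h : (1:Int) ∈ mats) : pvPickB mats 1 = 1 := by
  unfold pvPickB
  have h1f : (1:Int) ∈ mats.filter (fun x => decide (x ≤ (1:Int))) :=
    List.mem_filter.mpr ⟨h, by decide⟩
  cases hm : PySem.List.max? (mats.filter (fun x => decide (x ≤ (1:Int)))) (fun x => x) with
  | none =>
    rw [PySem.List.max?_eq_none_iff] at hm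
    rw [hm] at h1f
    simp at h1f
  | some y =>
    have hy := List.mem_filter.mp (PySem.List.max?_mem hm)
    have hle : y ≤ 1 := by simpa using hy.2
    have hge : (1:Int) ≤ y := PySem.List.max?_isMax hm 1 h1f
    simp [le_antisymm hle hge]

lemma pvPickB_zero_ne_one (mats : List Int) : pvPickB mats 0 ≠ 1 := by
  unfold pvPickB
  cases hm : PySem.List.max? (mats.filter (fun x => decide (x ≤ (0:Int)))) (fun x => x) with
  | none => decide
  | some y =>
    have hy := List.mem_filter.mp (PySem.List.max?_mem hm)
    have hle : y ≤ 0 := by simpa using hy.2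
    simp only []
    omega

lemma pv_best_zero (park : List (List String))
    (h : ∀ i, i < park.length → ∀ j, j < (park.headD []).length → pvOneB park i j = false) :
    pvBest park (min park.length (park.headD []).length) = 0 := by
  rcases pvBest_cases park (min park.length (park.headD []).length) with h0 | ⟨s, hs1, hst, hA, heq⟩
  · exact h0
  · exfalso
    have hsn : s ≤ park.length := le_trans hst (Nat.min_le_left _ _)
    have hsm : s ≤ (park.headD []).length := le_trans hst (Nat.min_le_right _ _)
    obtain ⟨ti, tj, h1, h2, hsq⟩ := (pvAnyW_iff park s hs1 hsn hsm).mp hA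
    have hone : pvOneB park ti tj = true := by simpa using hsq 0 (by omega) 0 (by omega)
    rw [h ti (by omega) tj (by omega)] at hone
    exact Bool.false_ne_true hone

lemma pv_best_one_border (park : List (List String))
    (hex : ∃ i, i < park.length ∧ ∃ j, j < (park.headD []).length ∧ pvOneB park i j = true)
    (hb : ∀ i, i < park.length → ∀ j, j < (park.headD []).length → pvOneB park i j = true → i = 0 ∨ j = 0) :
    pvBest park (min park.length (park.headD []).length) = 1 := by
  obtain ⟨i0, hi0, j0, hj0, hone⟩ := hex
  have hA1 : pvAnyW park 1 = true := by
    rw [pvAnyW_iff park 1 le_rfl (by omega) (by omega)]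
    refine ⟨i0, j0, by omega, by omega, ?_⟩
    intro a ha b hb'
    have ha0 : a = 0 := by omega
    have hb0 : b = 0 := by omega
    subst ha0; subst hb0
    simpa using hone
  have hge : (1:Int) ≤ pvBest park (min park.length (park.headD []).length) :=
    pvBest_ge park 1 _ le_rfl (Nat.le_min.mpr ⟨by omega, by omega⟩) hA1
  have hle : pvBest park (min park.length (park.headD []).length) ≤ 1 := by
    rcases pvBest_cases park (min park.length (park.headD []).length) with h0 | ⟨s, hs1, hst, hA, heq⟩
    · omega
    · rw [heq]
      by_contra hgt
      push_neg at hgt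
      have hs2 : 2 ≤ s := by
        have : (1:Int) < (s:Int) := hgt
        exact_mod_cast this
      obtain ⟨ti, tj, h1, h2, hsq⟩ := (pvAnyW_iff park s hs1
        (le_trans hst (Nat.min_le_left _ _)) (le_trans hst (Nat.min_le_right _ _))).mp hA
      have hcell := hsq 1 (by omega) 1 (by omega)
      have := hb (ti+1) (by omega) (tj+1) (by omega) hcell
      omega
  omega

lemma pv_mlA_le_best (park : List (List String)) :
    pvMlA' (park.headD []).length park
      ≤ pvBest park (min park.length (park.headD []).length) := by
  unfold pvMlA'
  rcases PySem.List.foldl_max_mem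
      ((List.range park.length).flatMap (fun i => pvContrib (park.headD []).length park i)) 0 with hml | hml
  · rw [hml]
    exact pvBest_nonneg park _
  · obtain ⟨i, hi, j, hj, hsk, heq⟩ := pv_valsA_mem (park.headD []).length park _ hml
    rw [heq]
    by_cases hpos : 1 ≤ pvFinVal (pvPrev (park.headD []).length park i) (park.getD i []) j
    · obtain ⟨s0, hs0⟩ : ∃ s0 : Nat,
          pvFinVal (pvPrev (park.headD []).length park i) (park.getD i []) j = ((s0+1 : Nat) : Int) := by
        refine ⟨(pvFinVal (pvPrev (park.headD []).length park i) (park.getD i []) j).toNat - 1, ?_⟩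
        have := Int.toNat_of_nonneg (by omega :
          0 ≤ pvFinVal (pvPrev (park.headD []).length park i) (park.getD i []) j)
        push_cast
        omega
      have hgood : pvGood park i j (s0+1) :=
        (pvDpv_iff (park.headD []).length park i hi j hj s0).mp (by
          show ((s0+1 : Nat) : Int) ≤ pvFinVal (pvPrev (park.headD []).length park i) (park.getD i []) j
          omega)
      obtain ⟨ti, tj, h1, h2, hsq⟩ := hgood
      have hA : pvAnyW park (s0+1) = true :=
        (pvAnyW_iff park (s0+1) (by omega) (by omega) (by omega)).mpr
          ⟨ti, tj, by omega, by omega, hsq⟩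
      have hbe := pvBest_ge park (s0+1) (min park.length (park.headD []).length) (by omega)
        (Nat.le_min.mpr ⟨by omega, by omega⟩) hA
      omega
    · have := pvBest_nonneg park (min park.length (park.headD []).length)
      omega

lemma pv_best_le_mlA (park : List (List String))
    (hint : ∃ i, i < park.length ∧ ∃ j, j < (park.headD []).length ∧
      pvOneB park i j = true ∧ i ≠ 0 ∧ j ≠ 0) :
    pvBest park (min park.length (park.headD []).length)
      ≤ pvMlA' (park.headD []).length park := by
  rcases pvBest_cases park (min park.length (park.headD []).length) with h0 | ⟨s, hs1, hst, hA, heq⟩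
  · rw [h0]
    exact pv_mlA_nonneg _ park
  · rw [heq]
    obtain ⟨ti, tj, h1, h2, hsq⟩ := (pvAnyW_iff park s hs1
      (le_trans hst (Nat.min_le_left _ _)) (le_trans hst (Nat.min_le_right _ _))).mp hA
    obtain ⟨s0, rfl⟩ : ∃ s0, s = s0 + 1 := ⟨s - 1, by omega⟩
    by_cases hs2 : 1 ≤ s0
    · have hi : ti + s0 < park.length := by omega
      have hj : tj + s0 < (park.headD []).length := by omega
      have hgood : pvGood park (ti+s0) (tj+s0) (s0+1) := ⟨ti, tj, by omega, by omega, hsq⟩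
      have hdp : ((s0+1 : Nat) : Int) ≤ pvDpv (park.headD []).length park (ti+s0) (tj+s0) :=
        (pvDpv_iff (park.headD []).length park (ti+s0) hi (tj+s0) hj s0).mpr hgood
      have honeij : pvOneB park (ti+s0) (tj+s0) = true :=
        pvGood_one park _ _ (s0+1) (by omega) hgood
      have hskip : pvSkip (ti+s0) (tj+s0) (park.getD (ti+s0) []) = false := by
        unfold pvSkip
        have hor : (((ti+s0) == 0) || ((tj+s0) == 0)) = false := by
          simp only [Bool.or_eq_false_iff, beq_eq_false_iff_ne]
          omega
        rw [hor, Bool.and_false]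
      have hmem := pv_valsA_mem_of (park.headD []).length park (ti+s0) (tj+s0) hi hj hskip
      have hub := (PySem.List.le_foldl_max
        ((List.range park.length).flatMap (fun i => pvContrib (park.headD []).length park i)) 0).2 _ hmem
      unfold pvMlA'
      have hdp' : ((s0+1 : Nat) : Int)
          ≤ pvFinVal (pvPrev (park.headD []).length park (ti+s0)) (park.getD (ti+s0) []) (tj+s0) := hdp
      omega
    · have hs0 : s0 = 0 := by omega
      subst hs0
      obtain ⟨i0, hi0, j0, hj0, hone0, hi0ne, hj0ne⟩ := hint
      have hskip0 : pvSkip i0 j0 (park.getD i0 []) = false := by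
        unfold pvSkip
        have hor : ((i0 == 0) || (j0 == 0)) = false := by
          simp only [Bool.or_eq_false_iff, beq_eq_false_iff_ne]
          omega
        rw [hor, Bool.and_false]
      have hmem := pv_valsA_mem_of (park.headD []).length park i0 j0 hi0 hj0 hskip0
      have hub := (PySem.List.le_foldl_max
        ((List.range park.length).flatMap (fun i => pvContrib (park.headD []).length park i)) 0).2 _ hmem
      have hpos := pvFinVal_cell_pos _ _ (pvPrev_getD_nonneg (park.headD []).length park i0) j0 hone0
      unfold pvMlA'
      push_cast
      omega

lemma pv_mlA_eq_best (park : List (List String))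
    (hint : ∃ i, i < park.length ∧ ∃ j, j < (park.headD []).length ∧
      pvOneB park i j = true ∧ i ≠ 0 ∧ j ≠ 0) :
    pvMlA' (park.headD []).length park
      = pvBest park (min park.length (park.headD []).length) :=
  le_antisymm (pv_mlA_le_best park) (pv_best_le_mlA park hint)

theorem solution_spec_aux (mats : List Int) (park : List (List String))
    (hnD : ¬ D_solution mats park) : solution mats park = solution_alt mats park := by
  rw [solution_eq, solution_alt_eq]
  by_cases hcell : ∃ i, i < park.length ∧ ∃ j, j < (park.headD []).length ∧ pvOneB park i j = true
  · by_cases hint : ∃ i, i < park.length ∧ ∃ j, j < (park.headD []).length ∧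
        pvOneB park i j = true ∧ i ≠ 0 ∧ j ≠ 0
    · rw [pv_mlA_eq_best park hint]
    · push_neg at hint
      have hball : ∀ i, i < park.length → ∀ j, j < (park.headD []).length →
          pvOneB park i j = true → i = 0 ∨ j = 0 := by
        intro i hi j hj hc
        by_contra hcon
        push_neg at hcon
        exact absurd (hint i hi j hj hc hcon.1) (by simpa using hcon.2)
      have hA0 := pv_mlA_zero (park.headD []).length park hball
      have hB1 := pv_best_one_border park hcell hball
      have h1nm : (1:Int) ∉ mats := by
        intro h1m
        apply hnD
        refine ⟨?_, ?_, h1m⟩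
        · obtain ⟨i, hi, j, hj, hc⟩ := hcell
          exact ⟨i, hi, j, hj, by simpa [pvOneB] using hc⟩
        · intro i hi j hj hc
          exact hball i hi j hj (by simpa [pvOneB] using hc)
      rw [hA0, hB1, pvPick_eq_pickB, pvPick_eq_pickB, pvPickB_zero_one mats h1nm]
  · push_neg at hcell
    have hnone : ∀ i, i < park.length → ∀ j, j < (park.headD []).length →
        pvOneB park i j = false := by
      intro i hi j hj
      cases hq : pvOneB park i j
      · rfl
      · exact absurd hq (hcell i hi j hj)
    have hA0 := pv_mlA_zero (park.headD []).length park (by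
      intro i hi j hj hc
      rw [hnone i hi j hj] at hc
      exact absurd hc (Bool.false_ne_true))
    have hB0 := pv_best_zero park hnone
    rw [hA0, hB0]

-- ===== VERDICT =====
theorem solution_spec : Claim_unchanged_solution := by
  intro mats park _ _
  unfold Spec_solution
  intro hnD
  exact solution_spec_aux mats park hnD

theorem solution_changed : Claim_changed_solution := by unfold Claim_changed_solution; decide

theorem solution_tight : Claim_exact_solution := by
  intro mats park _ _ hD
  obtain ⟨hex, hall, h1m⟩ := hD
  have hcell : ∃ i, i < park.length ∧ ∃ j, j < (park.headD []).length ∧ pvOneB park i j = true := by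
    obtain ⟨i, hi, j, hj, hc⟩ := hex
    exact ⟨i, hi, j, hj, by simpa [pvOneB] using hc⟩
  have hball : ∀ i, i < park.length → ∀ j, j < (park.headD []).length →
      pvOneB park i j = true → i = 0 ∨ j = 0 := by
    intro i hi j hj hc
    exact hall i hi j hj (by simpa [pvOneB] using hc)
  have hA0 := pv_mlA_zero (park.headD []).length park hball
  have hB1 := pv_best_one_border park hcell hball
  rw [solution_eq, hA0, solution_alt_eq, hB1, pvPick_eq_pickB, pvPick_eq_pickB,
    pvPickB_one_mem mats h1m]
  exact pvPickB_zero_ne_one mats
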